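-- pv_equiv track=rewrite | github.com/jkumari734/seating-arrangement | Input_processing.py | maptoReq
-- ===== SOURCE A (Python) =====
-- def maptoReq(optimal_requests, originalList):
--     i = 0
--     while(i<len(originalList)):
--         if originalList[i][1] in optimal_requests:
--             del optimal_requests[optimal_requests.index(originalList[i][1])]
--         else:
--             del originalList[i]
--             continue
--         i+=1
--     return originalList
-- ===== SOURCE B (Python) =====
-- def maptoReq(optimal_requests, originalList):
--     counts = {}
--     for v in optimal_requests:
--         counts[v] = counts.get(v, 0) + 1
--     result = []
--     for item in originalList:
--         c = counts.get(item[1], 0)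
--         if c > 0:
--             counts[item[1]] = c - 1
--             result.append(item)
--     return result
-- ===== Notes on version B (the rewrite author's own statement) =====
-- stated objective: faster
-- what changed: Replaces the quadratic index-and-delete loop (membership scan plus list.index plus del per element) with a one-pass count dictionary built from optimal_requests that is decremented per kept item, so no inner scans remain; B returns a fresh list and does not mutate its arguments (A mutates both in place; return values agree).
import Mathlib
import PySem

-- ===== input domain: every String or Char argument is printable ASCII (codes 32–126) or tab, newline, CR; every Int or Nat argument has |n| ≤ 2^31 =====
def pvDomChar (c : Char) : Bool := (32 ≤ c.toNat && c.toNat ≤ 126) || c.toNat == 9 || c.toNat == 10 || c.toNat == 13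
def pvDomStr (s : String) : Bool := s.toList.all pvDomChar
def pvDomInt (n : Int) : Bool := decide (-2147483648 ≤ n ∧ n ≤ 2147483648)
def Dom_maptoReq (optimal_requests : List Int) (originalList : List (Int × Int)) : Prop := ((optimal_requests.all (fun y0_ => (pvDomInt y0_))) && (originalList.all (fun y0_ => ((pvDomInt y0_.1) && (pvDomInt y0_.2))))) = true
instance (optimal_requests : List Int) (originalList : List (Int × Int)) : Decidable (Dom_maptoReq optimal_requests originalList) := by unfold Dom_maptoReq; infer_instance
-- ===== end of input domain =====

-- B replaces A's quadratic index-and-delete loop with a one-pass count dictionary (asymptotically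
-- faster); equivalence is about the RETURN value only: A mutates both argument lists in place, B does not.

-- ===== PORT A =====
-- while loop of A: i is the index, reqs the current optimal_requests, lst the current originalList;
-- 'del reqs[reqs.index v]' removes the first occurrence (List.erase), 'del lst[i]' is eraseIdx.
def maptoReqLoop (reqs : List Int) (lst : List (Int × Int)) (i : Nat) : List (Int × Int) :=
  if h : i < lst.length then
    if lst[i].2 ∈ reqs then
      maptoReqLoop (reqs.erase lst[i].2) lst (i + 1)
    else
      maptoReqLoop reqs (lst.eraseIdx i) i
  else lst
termination_by lst.length - i
decreasing_by
  · omega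
  · have := List.length_eraseIdx_of_lt (l := lst) (i := i) h; omega

def maptoReq (optimal_requests : List Int) (originalList : List (Int × Int)) : List (Int × Int) :=
  maptoReqLoop optimal_requests originalList 0

-- ===== PORT B =====
-- Source B: build counts = {v: multiplicity} in one pass, then one pass over originalList keeping an
-- item iff its value's count is positive, decrementing; result accumulated in order.
def maptoReq_alt (optimal_requests : List Int) (originalList : List (Int × Int)) : List (Int × Int) :=
  let counts := optimal_requests.foldl (fun d v => d.insert v (d.getD v 0 + 1)) PySem.Dict.empty
  (originalList.foldl
    (fun (st : PySem.Dict Int Int × List (Int × Int)) item =>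
      let c := st.1.getD item.2 0
      if c > 0 then (st.1.insert item.2 (c - 1), st.2 ++ [item]) else st)
    (counts, [])).2

-- ===== PRECONDITION & SPEC =====
def Spec_maptoReq (optimal_requests : List Int) (originalList : List (Int × Int)) (out : List (Int × Int)) : Prop := out = maptoReq_alt optimal_requests originalList
instance (optimal_requests : List Int) (originalList : List (Int × Int)) (out : List (Int × Int)) : Decidable (Spec_maptoReq optimal_requests originalList out) := by unfold Spec_maptoReq; infer_instance

-- ===== CLAIM (what is proved, stated in full; the proofs are below) =====
def Claim_equal_maptoReq : Prop := ∀ (optimal_requests : List Int) (originalList : List (Int × Int)), Dom_maptoReq optimal_requests originalList → Spec_maptoReq optimal_requests originalList (maptoReq optimal_requests originalList)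

-- ===== LEMMAS AND PROOFS =====

-- reference filter: keep x iff its value is still in reqs, erasing the first occurrence on a match
def filtRef (reqs : List Int) : List (Int × Int) → List (Int × Int)
  | [] => []
  | x :: xs => if x.2 ∈ reqs then x :: filtRef (reqs.erase x.2) xs else filtRef reqs xs

theorem maptoReqLoop_eq (reqs : List Int) (lst : List (Int × Int)) (i : Nat) :
    maptoReqLoop reqs lst i = lst.take i ++ filtRef reqs (lst.drop i) := by
  fun_induction maptoReqLoop reqs lst i with
  | case1 reqs lst i h hmem ih =>
    have hd : lst.drop i = lst[i] :: lst.drop (i + 1) := List.drop_eq_getElem_cons h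
    have ht : lst.take (i + 1) = lst.take i ++ [lst[i]] := by
      rw [List.take_add_one, List.getElem?_eq_getElem h]; rfl
    rw [ih, hd, filtRef, if_pos hmem, ht, List.append_assoc, List.singleton_append]
  | case2 reqs lst i h hmem ih =>
    have hd : lst.drop i = lst[i] :: lst.drop (i + 1) := List.drop_eq_getElem_cons h
    rw [ih, hd, filtRef, if_neg hmem]
    have h1 : (lst.eraseIdx i).take i = lst.take i := by
      rw [List.eraseIdx_eq_take_drop_succ]
      rw [List.take_append]
      simp [List.length_take, Nat.min_eq_left (Nat.le_of_lt h)]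
    have h2 : (lst.eraseIdx i).drop i = lst.drop (i + 1) := by
      rw [List.eraseIdx_eq_take_drop_succ]
      rw [List.drop_append]
      simp [List.length_take, Nat.min_eq_left (Nat.le_of_lt h)]
    rw [h1, h2]
  | case3 reqs lst i h =>
    have : lst.length ≤ i := Nat.le_of_not_lt h
    simp [List.take_of_length_le this, List.drop_of_length_le this, filtRef]

-- B's second fold, with any dict whose counts agree with reqs' multiset, appends filtRef reqs lst
theorem foldl_eq_filtRef (lst : List (Int × Int)) (reqs : List Int) (d : PySem.Dict Int Int)
    (acc : List (Int × Int)) (hinv : ∀ v : Int, d.getD v 0 = (reqs.count v : Int)) :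
    (lst.foldl
      (fun (st : PySem.Dict Int Int × List (Int × Int)) item =>
        let c := st.1.getD item.2 0
        if c > 0 then (st.1.insert item.2 (c - 1), st.2 ++ [item]) else st)
      (d, acc)).2 = acc ++ filtRef reqs lst := by
  induction lst generalizing reqs d acc with
  | nil => simp [filtRef]
  | cons x xs ih =>
    simp only [List.foldl_cons]
    by_cases hm : x.2 ∈ reqs
    · have hc : (0 : Int) < d.getD x.2 0 := by
        rw [hinv]; exact_mod_cast List.count_pos_iff.mpr hm
      have hinv' : ∀ v : Int, (d.insert x.2 (d.getD x.2 0 - 1)).getD v 0 = ((reqs.erase x.2).count v : Int) := by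
        intro v
        rw [PySem.Dict.getD_insert]
        by_cases hv : v = x.2
        · subst hv
          have h1 : 1 ≤ reqs.count x.2 := List.count_pos_iff.mpr hm
          simp [hinv, List.count_erase_self]
          omega
        · simp [hv, hinv, List.count_erase_of_ne hv]
      simp only [if_pos hc]
      rw [ih (reqs.erase x.2) _ _ hinv']
      simp [filtRef, hm]
    · have hc : ¬ (0 : Int) < d.getD x.2 0 := by
        have : reqs.count x.2 = 0 := List.count_eq_zero.mpr hm
        simp [hinv, this]
      simp only [if_neg hc]
      rw [ih reqs d acc hinv]
      simp [filtRef, hm]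

-- ===== VERDICT (by name: the statement is the Claim_ definition above) =====
theorem maptoReq_spec : Claim_equal_maptoReq := by
  intro reqs lst _
  show maptoReq reqs lst = maptoReq_alt reqs lst
  unfold maptoReq maptoReq_alt
  rw [maptoReqLoop_eq]
  simp only [List.take_zero, List.drop_zero, List.nil_append]
  rw [PySem.Dict.foldl_insert_getD_add_one_eq_counter]
  rw [foldl_eq_filtRef lst reqs _ [] (fun v => PySem.Dict.getD_counter reqs v)]
  simp
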